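-- pv_equiv track=rewrite | github.com/bollu/human-analysis-lab-matrix-problem | python-implementation.py | strmatdiag
-- ===== SOURCE A (Python) =====
-- ALIGNMENTSTR = "%6s"
--
-- def matdiagdim(m):
--     assert len(m) == len(m[0])
--     return (len(m), len(m[0][0]))
--
-- def strmatdiag(m):
--     S, D = matdiagdim(m)
--
--     out = ""
--     for i in range(S * D):
--         for j in range(S * D):
--             si = i // D
--             sj = j // D
--
--             di = i % D
--             dj = j % D
--
--             if (di == dj):
--                 out += ALIGNMENTSTR % str(m[si][sj][di])
--             else:
--                 out += ALIGNMENTSTR % "0"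
--         out += "\n";
--
--     # out += ("-" * S * D) + "\n"
--
--     return out
-- ===== SOURCE B (Python) =====
-- ALIGNMENTSTR = "%6s"
--
-- def matdiagdim(m):
--     assert len(m) == len(m[0])
--     return (len(m), len(m[0][0]))
--
-- def strmatdiag(m):
--     S, D = matdiagdim(m)
--     z = ALIGNMENTSTR % "0"
--     rows = []
--     for si in range(S):
--         for di in range(D):
--             cells = []
--             for sj in range(S):
--                 cells.append(z * di
--                              + (ALIGNMENTSTR % str(m[si][sj][di]))
--                              + z * (D - 1 - di))
--             rows.append("".join(cells) + "\n")
--     return "".join(rows)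
-- ===== Notes on version B (the rewrite author's own statement) =====
-- stated objective: alternative
-- what changed: Instead of one flat (S*D)x(S*D) cell loop that tests di==dj and recomputes i//D, i%D for every cell, B iterates over block-row si and offset di, places the diagonal value of each column block directly at its offset between repeated zero cells, and joins the collected rows.
import Mathlib
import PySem

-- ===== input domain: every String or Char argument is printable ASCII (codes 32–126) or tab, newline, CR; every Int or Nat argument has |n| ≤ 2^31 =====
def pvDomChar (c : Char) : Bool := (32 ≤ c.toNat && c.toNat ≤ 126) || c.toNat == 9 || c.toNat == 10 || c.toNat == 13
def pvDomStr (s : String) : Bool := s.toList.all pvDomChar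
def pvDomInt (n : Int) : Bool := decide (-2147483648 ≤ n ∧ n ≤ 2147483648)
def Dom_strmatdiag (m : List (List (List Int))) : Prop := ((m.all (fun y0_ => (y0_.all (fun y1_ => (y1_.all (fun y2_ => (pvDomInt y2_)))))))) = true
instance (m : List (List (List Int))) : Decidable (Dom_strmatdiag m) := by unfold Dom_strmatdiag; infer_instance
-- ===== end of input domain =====

-- B builds the output row by row (block-row si, offset di), placing the single diagonal
-- value of each block directly at its offset instead of testing di == dj on every cell.

-- ===== PORT A =====
-- ALIGNMENTSTR % s  =  "%6s" % s : right-justify with spaces to width 6 (exact: no truncation of longer strings)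
def fmt6 (s : String) : String := String.ofList (List.replicate (6 - s.toList.length) ' ') ++ s

def strmatdiag (m : List (List (List Int))) : String :=
  let S : Int := m.length
  let D : Int := (PySem.List.pyGetD (PySem.List.pyGetD m 0 []) 0 []).length
  (PySem.List.pyRange 0 (S * D) 1).foldl (fun out i =>
    ((PySem.List.pyRange 0 (S * D) 1).foldl (fun out j =>
      let si := PySem.Int.floordiv i D
      let sj := PySem.Int.floordiv j D
      let di := PySem.Int.mod i D
      let dj := PySem.Int.mod j D
      if di = dj then
        out ++ fmt6 (PySem.Int.toStr (PySem.List.pyGetD (PySem.List.pyGetD (PySem.List.pyGetD m si []) sj []) di 0))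
      else
        out ++ fmt6 "0") out) ++ "\n") ""

-- ===== PORT B =====
-- Python string repetition s * n (n ≤ 0 gives ""); exact, ported by hand
def strRepeat (s : String) (n : Int) : String := String.ofList (List.replicate n.toNat s.toList).flatten

def strmatdiag_alt (m : List (List (List Int))) : String :=
  let S : Int := m.length
  let D : Int := (PySem.List.pyGetD (PySem.List.pyGetD m 0 []) 0 []).length
  let z := fmt6 "0"
  let rows : List String :=
    (PySem.List.pyRange 0 S 1).foldl (fun rows si =>
      (PySem.List.pyRange 0 D 1).foldl (fun rows di =>
        let cells := (PySem.List.pyRange 0 S 1).map (fun sj =>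
          strRepeat z di
            ++ fmt6 (PySem.Int.toStr (PySem.List.pyGetD (PySem.List.pyGetD (PySem.List.pyGetD m si []) sj []) di 0))
            ++ strRepeat z (D - 1 - di))
        rows ++ [PySem.Str.join "" cells ++ "\n"]) rows) []
  PySem.Str.join "" rows

-- ===== PRECONDITION & SPEC =====
-- Pre_ excludes exactly the inputs where the Python A raises: the empty matrix (IndexError on
-- m[0]), matrices failing the assertion len(m) == len(m[0]), and ragged inputs where some
-- accessed cell m[si][sj][di] (si, sj < len(m), di < len(m[0][0])) is out of range (IndexError).
def Pre_strmatdiag (m : List (List (List Int))) : Prop :=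
  m ≠ [] ∧ (m.headD []).length = m.length ∧
  (((m.headD []).headD []).length = 0 ∨
    ((∀ row ∈ m, m.length ≤ row.length) ∧
     ∀ row ∈ m, ∀ blk ∈ row.take m.length, ((m.headD []).headD []).length ≤ blk.length))
instance (m : List (List (List Int))) : Decidable (Pre_strmatdiag m) := by unfold Pre_strmatdiag; infer_instance

def pvWitness_strmatdiag : List (List (List Int)) := [[[1, 2], [3, 4]], [[5, 6], [7, 8]]]

def Spec_strmatdiag (m : List (List (List Int))) (out : String) : Prop := out = strmatdiag_alt m
instance (m : List (List (List Int))) (out : String) : Decidable (Spec_strmatdiag m out) := by unfold Spec_strmatdiag; infer_instance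

-- ===== CLAIM (what is proved, stated in full; the proofs are below) =====
def Claim_equal_strmatdiag : Prop := ∀ (m : List (List (List Int))), Dom_strmatdiag m → Pre_strmatdiag m → Spec_strmatdiag m (strmatdiag m)

-- ===== LEMMAS AND PROOFS =====

-- proof-only abbreviations: the formatted zero cell and the formatted value cell, as char lists
def Zc : List Char := (fmt6 "0").toList
def Vc (m : List (List (List Int))) (si sj di : Nat) : List Char :=
  (fmt6 (PySem.Int.toStr (((m.getD si []).getD sj []).getD di 0))).toList

theorem strFoldl_ite_out {α : Type} (l : List α) (c : α → Prop) [DecidablePred c]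
    (f g : α → String) (init : String) :
    l.foldl (fun acc x => if c x then acc ++ f x else acc ++ g x) init
      = init ++ l.foldl (fun acc x => if c x then acc ++ f x else acc ++ g x) "" := by
  induction l generalizing init with
  | nil => simp
  | cons x t ih =>
    simp only [List.foldl_cons]
    by_cases h : c x <;>
      simp only [h, if_pos, if_neg, not_false_iff] <;>
      [skip; skip] <;> rw [ih (init ++ _), ih ("" ++ _)] <;> simp [String.append_assoc]

theorem strFoldl_ite_toList {α : Type} (l : List α) (c : α → Prop) [DecidablePred c]
    (f g : α → String) (init : String) :
    (l.foldl (fun acc x => if c x then acc ++ f x else acc ++ g x) init).toList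
      = init.toList ++ l.flatMap (fun x => if c x then (f x).toList else (g x).toList) := by
  induction l generalizing init with
  | nil => simp
  | cons x t ih =>
    simp only [List.foldl_cons]
    by_cases h : c x <;> simp [h, ih]

-- A's nested accumulate-into-a-string loops, as one flatMap over char lists
theorem A_fold_toList (L M : List Int) (c : Int → Int → Prop) [∀ i j, Decidable (c i j)]
    (f : Int → Int → String) (z init : String) :
    (L.foldl (fun out i =>
       (M.foldl (fun out j => if c i j then out ++ f i j else out ++ z) out) ++ "\n") init).toList
      = init.toList ++ L.flatMap (fun i =>
          M.flatMap (fun j => if c i j then (f i j).toList else z.toList) ++ ['\n']) := by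
  induction L generalizing init with
  | nil => simp
  | cons x t ih =>
    simp only [List.foldl_cons]
    rw [ih, strFoldl_ite_out]
    simp [strFoldl_ite_toList]

theorem join_empty_sep (parts : List (List Char)) :
    PySem.Chars.join [] parts = parts.flatten := by
  show List.intercalate [] parts = _
  induction parts with
  | nil => rfl
  | cons x t ih => cases t with
    | nil => simp [List.intercalate]
    | cons y s => simp_all [List.intercalate, List.intersperse]

-- B's two nested append-a-row loops, as one flatMap of rows
theorem nested_rows {α β : Type} (L : List α) (M : List β) (G : α → β → String)
    (init : List String) :
    L.foldl (fun rows si => M.foldl (fun rows di => rows ++ [G si di]) rows) init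
      = init ++ L.flatMap (fun si => M.map (G si)) := by
  induction L generalizing init with
  | nil => simp
  | cons x t ih =>
    simp only [List.foldl_cons]
    rw [PySem.List.foldl_append_singleton_eq_map, ih]
    simp

theorem flatten_flatMap {α β : Type} (l : List α) (f : α → List (List β)) :
    (l.flatMap f).flatten = l.flatMap (fun x => (f x).flatten) := by
  induction l with
  | nil => simp
  | cons x t ih => simp [List.flatMap_cons, List.flatten_append, ih]

theorem A_char (m : List (List (List Int))) (n d : Nat) (hn : n = m.length)
    (hd : d = (PySem.List.pyGetD (PySem.List.pyGetD m 0 []) 0 []).length) :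
    (strmatdiag m).toList
      = (List.range (n*d)).flatMap (fun i =>
          (List.range (n*d)).flatMap (fun j =>
            if i % d = j % d then Vc m (i/d) (j/d) (i%d) else Zc) ++ ['\n']) := by
  have e1 : (strmatdiag m).toList =
      ((PySem.List.pyRange 0 ((n:Int) * (d:Int)) 1).foldl (fun out i =>
        ((PySem.List.pyRange 0 ((n:Int) * (d:Int)) 1).foldl (fun out j =>
          if PySem.Int.mod i (d:Int) = PySem.Int.mod j (d:Int) then
            out ++ fmt6 (PySem.Int.toStr (PySem.List.pyGetD (PySem.List.pyGetD (PySem.List.pyGetD m (PySem.Int.floordiv i (d:Int)) []) (PySem.Int.floordiv j (d:Int)) []) (PySem.Int.mod i (d:Int)) 0))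
          else
            out ++ fmt6 "0") out) ++ "\n") "").toList := by
    subst hn hd; rfl
  rw [e1, A_fold_toList]
  have e2 : PySem.List.pyRange 0 ((n:Int) * (d:Int)) 1 = (List.range (n*d)).map (Nat.cast : Nat → Int) := by
    rw [PySem.List.pyRange_one, sub_zero, ← Nat.cast_mul, Int.toNat_natCast]
    apply List.map_congr_left
    intro k _
    rw [zero_add]
  rw [e2, List.flatMap_map]
  have hnil : ("" : String).toList = [] := by simp
  rw [hnil, List.nil_append]
  apply List.flatMap_congr
  intro i _
  rw [List.flatMap_map]
  congr 1
  apply List.flatMap_congr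
  intro j _
  rw [PySem.Int.mod_natCast i d, PySem.Int.mod_natCast j d,
    PySem.Int.floordiv_natCast i d, PySem.Int.floordiv_natCast j d,
    PySem.List.pyGetD_natCast, PySem.List.pyGetD_natCast, PySem.List.pyGetD_natCast]
  have hc : ((i : Int) % (d : Int) = (j : Int) % (d : Int)) ↔ i % d = j % d := by omega
  simp [Vc, Zc, hc]

theorem B_char (m : List (List (List Int))) (n d : Nat) (hn : n = m.length)
    (hd : d = (PySem.List.pyGetD (PySem.List.pyGetD m 0 []) 0 []).length) :
    (strmatdiag_alt m).toList
      = (List.range n).flatMap (fun si => (List.range d).flatMap (fun di =>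
          (List.range n).flatMap (fun sj =>
            (List.replicate di Zc).flatten ++ Vc m si sj di ++ (List.replicate (d-1-di) Zc).flatten)
          ++ ['\n'])) := by
  have e1 : strmatdiag_alt m =
      PySem.Str.join "" ((PySem.List.pyRange 0 (n:Int) 1).foldl (fun rows si =>
        (PySem.List.pyRange 0 (d:Int) 1).foldl (fun rows di =>
          rows ++ [PySem.Str.join "" ((PySem.List.pyRange 0 (n:Int) 1).map (fun sj =>
            strRepeat (fmt6 "0") di
              ++ fmt6 (PySem.Int.toStr (PySem.List.pyGetD (PySem.List.pyGetD (PySem.List.pyGetD m si []) sj []) di 0))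
              ++ strRepeat (fmt6 "0") ((d:Int) - 1 - di))) ++ "\n"]) rows) []) := by
    subst hn hd; rfl
  have e2 : ∀ (N : Nat), PySem.List.pyRange 0 (N:Int) 1 = (List.range N).map (Nat.cast : Nat → Int) := by
    intro N
    rw [PySem.List.pyRange_one, sub_zero, Int.toNat_natCast]
    apply List.map_congr_left
    intro k _
    rw [zero_add]
  rw [e1, nested_rows, List.nil_append]
  rw [PySem.Str.toList_join, show ("" : String).toList = [] from by simp, join_empty_sep]
  rw [e2, e2]
  rw [List.flatMap_map]
  rw [List.map_flatMap, flatten_flatMap]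
  apply List.flatMap_congr
  intro si _
  rw [List.map_map, List.map_map]
  show ((List.range d).map _).flatten = _
  rw [← List.flatMap_def]
  apply List.flatMap_congr
  intro di hdi
  have hdd : di < d := List.mem_range.mp hdi
  have ht : ((d:Int) - 1 - (di:Int)).toNat = d - 1 - di := by omega
  simp only [Function.comp_apply]
  rw [String.toList_append, PySem.Str.toList_join, show ("" : String).toList = [] from by simp,
    join_empty_sep, List.map_map, List.map_map, ← List.flatMap_def]
  congr 1
  · apply List.flatMap_congr
    intro sj _
    simp only [Function.comp_apply]
    rw [PySem.List.pyGetD_natCast, PySem.List.pyGetD_natCast]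
    simp [strRepeat, Vc, Zc, ht]

-- range (n*d) enumerated block by block
theorem range_mul_flatMap (n d : Nat) :
    List.range (n * d) = (List.range n).flatMap (fun si => (List.range d).map (fun di => si * d + di)) := by
  induction n with
  | zero => simp
  | succ k ih =>
    have h : (k + 1) * d = k * d + d := by ring
    rw [h, List.range_add, List.range_succ, ih]
    simp [List.flatMap_append]

-- one block row of d cells: the value sits at offset di, zeros elsewhere
theorem place_map (d di : Nat) (hd : di < d) (v z : List Char) :
    (List.range d).map (fun dj => if di = dj then v else z)
      = List.replicate di z ++ v :: List.replicate (d - 1 - di) z := by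
  induction d generalizing di with
  | zero => omega
  | succ k ih =>
    rw [List.range_succ_eq_map]
    cases di with
    | zero =>
      simp only [List.map_cons, List.map_map]
      have h : ((fun dj => if 0 = dj then v else z) ∘ Nat.succ) = fun _ => z := by
        funext dj; simp
      simp [h, List.map_const', List.replicate]
    | succ i =>
      have hi : i < k := by omega
      simp only [List.map_cons, List.map_map]
      have h1 : (if i + 1 = 0 then v else z) = z := by simp
      have h2 : ((fun dj => if i + 1 = dj then v else z) ∘ Nat.succ)
          = fun dj => if i = dj then v else z := by
        funext dj; simp [Function.comp, Nat.succ_eq_add_one]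
      rw [h1, h2, ih i hi]
      have h3 : k + 1 - 1 - (i + 1) = k - 1 - i := by omega
      rw [h3, List.replicate_succ]
      simp

theorem place_flatMap (d di : Nat) (hd : di < d) (v z : List Char) :
    (List.range d).flatMap (fun dj => if di = dj then v else z)
      = (List.replicate di z).flatten ++ v ++ (List.replicate (d - 1 - di) z).flatten := by
  rw [List.flatMap_def, place_map d di hd v z]
  simp [List.flatten_append, List.append_assoc]

-- the bridge: A's flat double loop, regrouped by (block row, offset, block column), is B's rows
theorem AB_core (m : List (List (List Int))) (n d : Nat) :
    (List.range (n*d)).flatMap (fun i =>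
        (List.range (n*d)).flatMap (fun j =>
          if i % d = j % d then Vc m (i/d) (j/d) (i%d) else Zc) ++ ['\n'])
    = (List.range n).flatMap (fun si => (List.range d).flatMap (fun di =>
        (List.range n).flatMap (fun sj =>
          (List.replicate di Zc).flatten ++ Vc m si sj di ++ (List.replicate (d-1-di) Zc).flatten)
        ++ ['\n'])) := by
  rw [range_mul_flatMap n d]
  rw [List.flatMap_assoc]
  apply List.flatMap_congr
  intro si hsi
  rw [List.flatMap_map]
  apply List.flatMap_congr
  intro di hdi
  have hdd : di < d := List.mem_range.mp hdi
  have hdpos : 0 < d := by omega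
  have hdiv : (si * d + di) / d = si := by
    rw [mul_comm si d, Nat.mul_add_div hdpos, Nat.div_eq_of_lt hdd, Nat.add_zero]
  have hmod : (si * d + di) % d = di := by
    rw [mul_comm si d, Nat.mul_add_mod, Nat.mod_eq_of_lt hdd]
  rw [hdiv, hmod]
  congr 1
  rw [List.flatMap_assoc]
  apply List.flatMap_congr
  intro sj hsj
  rw [List.flatMap_map]
  have step : ∀ dj ∈ List.range d,
      (if di = (sj * d + dj) % d then Vc m si ((sj * d + dj) / d) di else Zc)
        = (if di = dj then Vc m si sj di else Zc) := by
    intro dj hdj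
    have hdj' : dj < d := List.mem_range.mp hdj
    rw [mul_comm sj d, Nat.mul_add_mod, Nat.mod_eq_of_lt hdj',
      Nat.mul_add_div hdpos, Nat.div_eq_of_lt hdj', Nat.add_zero]
  rw [List.flatMap_congr step, place_flatMap d di hdd]

theorem strmatdiag_eq_alt (m : List (List (List Int))) : strmatdiag m = strmatdiag_alt m := by
  apply String.toList_inj.mp
  rw [A_char m m.length (PySem.List.pyGetD (PySem.List.pyGetD m 0 []) 0 []).length rfl rfl,
    B_char m m.length (PySem.List.pyGetD (PySem.List.pyGetD m 0 []) 0 []).length rfl rfl,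
    AB_core]

-- ===== VERDICT (by name: the statement is the Claim_ definition above) =====
theorem strmatdiag_spec : Claim_equal_strmatdiag := by
  intro m _ _
  show _ = _
  exact strmatdiag_eq_alt m
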